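-- pv_equiv track=rewrite | github.com/Crippius/whatsapp-wrapped | PDF_Constructor.py | concentrate_values
-- ===== SOURCE A (Python) =====
-- def concentrate_values(in_dict:dict, max_values:int, others:bool) -> dict:
--     # DESCRIPTION: make dictionary smaller by remvoing keys with smaller values
--     # PARAMETERS: in_dict (dict) = dictionary that is going to be modified | max_values (int) = number of unique dict keys
--     # others (bool) = add additional key with sum of values of the last keys in it
--
--     if len(in_dict.keys()) <= max_values: # If dict already smaller than the maximum value, don't modify it
--         return in_dict
--
--     out_dict = {}
--     for i in list(in_dict.keys())[:max_values-others]: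
--         out_dict[i] = in_dict[i]
--
--     if others:                                                                                          # N.B. "altri" == "others"
--         if len(list(in_dict.keys())[max_values-others:]) == 1: # Edge case: when only one key is remaining, don't show "Altri", but the key
--             out_dict[list(in_dict.keys())[max_values-others]] = in_dict[list(in_dict.keys())[max_values-others]]
--         else:
--             out_dict["Altri"] = sum([i for i in list(in_dict.values())[max_values-others:]])
--
--     return out_dict
-- ===== SOURCE B (Python) =====
-- def concentrate_values(in_dict: dict, max_values: int, others: bool) -> dict:
--     # Single pass over items: keep the first k entries, fold the tail on the fly.
--     n = len(in_dict)
--     if n <= max_values: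
--         return in_dict
--     k = max_values - (1 if others else 0)
--     if k < 0:
--         k += n
--         if k < 0:
--             k = 0
--     out_dict = {}
--     tail_sum = 0
--     tail = None
--     tail_count = 0
--     for idx, (key, val) in enumerate(in_dict.items()):
--         if idx < k:
--             out_dict[key] = val
--         else:
--             tail_sum += val
--             tail_count += 1
--             tail = (key, val)
--     if others:
--         if tail_count == 1:
--             out_dict[tail[0]] = tail[1]
--         else:
--             out_dict["Altri"] = tail_sum
--     return out_dict
-- ===== Notes on version B (the rewrite author's own statement) =====
-- stated objective: alternative
-- what changed: A slices the key list three times and looks every kept key up in the dict again; B makes one enumerate pass over the items, inserting the first k entries and folding the tail's sum/count/last entry as it goes, with no slicing and no lookups.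
-- crash fix: On a one-entry dict with others=True and max_values<0, A raises IndexError (it indexes keys[max_values-1] past the front of the list); B returns the dict unchanged. — e.g. on concentrate_values([("a", 5)], -1, true): A raises IndexError, B returns [("a", 5)]
import Mathlib
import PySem

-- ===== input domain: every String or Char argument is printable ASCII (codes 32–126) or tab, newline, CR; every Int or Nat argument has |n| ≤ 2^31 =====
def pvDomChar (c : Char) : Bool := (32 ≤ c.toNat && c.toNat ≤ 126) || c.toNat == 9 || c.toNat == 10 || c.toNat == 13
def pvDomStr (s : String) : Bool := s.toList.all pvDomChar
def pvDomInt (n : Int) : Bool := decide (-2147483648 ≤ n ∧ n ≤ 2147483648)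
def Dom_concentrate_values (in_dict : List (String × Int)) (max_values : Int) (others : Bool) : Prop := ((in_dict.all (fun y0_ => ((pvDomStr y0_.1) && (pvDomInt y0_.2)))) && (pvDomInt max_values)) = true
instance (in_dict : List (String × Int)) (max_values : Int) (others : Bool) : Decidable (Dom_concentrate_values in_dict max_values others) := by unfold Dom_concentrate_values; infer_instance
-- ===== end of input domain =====

-- B replaces A's three list slices and per-key dict lookups by one enumerate pass over the
-- items that folds the tail's sum/count/last entry on the fly (RETURN value equivalence only).

-- ===== PORT A =====
def concentrate_values (in_dict : List (String × Int)) (max_values : Int) (others : Bool) : List (String × Int) :=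
  if (in_dict.length : Int) ≤ max_values then in_dict
  else
    let d : PySem.Dict String Int := PySem.Dict.mk in_dict
    let keys : List String := in_dict.map Prod.fst
    let c : Int := max_values - (if others then 1 else 0)
    let out0 : PySem.Dict String Int :=
      (PySem.List.slice keys none (some c)).foldl (fun o i => o.insert i (d.getD i 0)) PySem.Dict.empty
    let out : PySem.Dict String Int :=
      if others then
        if (PySem.List.slice keys (some c) none).length == 1 then
          let kk : String := (PySem.List.pyGet? keys c).getD ""
          out0.insert kk (d.getD kk 0)
        else
          out0.insert "Altri" ((PySem.List.slice (in_dict.map Prod.snd) (some c) none).sum)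
      else out0
    out.items

-- ===== PORT B =====
def concentrate_values_alt (in_dict : List (String × Int)) (max_values : Int) (others : Bool) : List (String × Int) :=
  if (in_dict.length : Int) ≤ max_values then in_dict
  else
    let n : Int := in_dict.length
    let c : Int := max_values - (if others then 1 else 0)
    let k : Int := if c < 0 then (if n + c < 0 then 0 else n + c) else c
    let st :=
      (PySem.List.enumerate in_dict 0).foldl
        (fun (st : PySem.Dict String Int × Int × Option (String × Int) × Int) p =>
          if p.1 < k then (st.1.insert p.2.1 p.2.2, st.2)
          else (st.1, st.2.1 + p.2.2, some p.2, st.2.2.2 + 1))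
        (PySem.Dict.empty, 0, none, 0)
    let out : PySem.Dict String Int :=
      if others then
        if st.2.2.2 == 1 then
          let p := st.2.2.1.getD ("", 0)
          st.1.insert p.1 p.2
        else st.1.insert "Altri" st.2.1
      else st.1
    out.items

-- ===== PRECONDITION & SPEC =====
-- Pre_ excludes (a) association lists with duplicate keys — they do not represent a Python dict,
-- which is what A receives — and (b) the inputs where A raises IndexError (others with a
-- one-entry dict and negative max_values: A indexes keys[max_values-1] past the front).
def Pre_concentrate_values (in_dict : List (String × Int)) (max_values : Int) (others : Bool) : Prop :=
  (in_dict.map Prod.fst).Nodup ∧ ¬(others = true ∧ in_dict.length = 1 ∧ max_values < 0)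
instance (in_dict : List (String × Int)) (max_values : Int) (others : Bool) : Decidable (Pre_concentrate_values in_dict max_values others) := by unfold Pre_concentrate_values; infer_instance
def pvWitness_concentrate_values : (List (String × Int)) × Int × Bool :=
  ([("a", 3), ("b", 1), ("c", 2), ("d", 5)], 2, true)

-- On a one-entry dict with others=True and max_values<0, A raises IndexError; B returns the dict unchanged.
def Raises_concentrate_values (in_dict : List (String × Int)) (max_values : Int) (others : Bool) : Prop :=
  others = true ∧ in_dict.length = 1 ∧ max_values < 0
instance (in_dict : List (String × Int)) (max_values : Int) (others : Bool) : Decidable (Raises_concentrate_values in_dict max_values others) := by unfold Raises_concentrate_values; infer_instance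
def pvRaiseWitness_concentrate_values : (List (String × Int)) × Int × Bool := ([("a", 5)], -1, true)
def pvRaiseWitnessOut_concentrate_values : List (String × Int) := [("a", 5)]

def Spec_concentrate_values (in_dict : List (String × Int)) (max_values : Int) (others : Bool) (out : List (String × Int)) : Prop := out = concentrate_values_alt in_dict max_values others
instance (in_dict : List (String × Int)) (max_values : Int) (others : Bool) (out : List (String × Int)) : Decidable (Spec_concentrate_values in_dict max_values others out) := by unfold Spec_concentrate_values; infer_instance

-- ===== CLAIM (what is proved, stated in full; the proofs are below) =====
def Claim_equal_concentrate_values : Prop := ∀ (in_dict : List (String × Int)) (max_values : Int) (others : Bool), Dom_concentrate_values in_dict max_values others → Pre_concentrate_values in_dict max_values others → Spec_concentrate_values in_dict max_values others (concentrate_values in_dict max_values others)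
def Claim_raises_concentrate_values : Prop := (∀ (in_dict : List (String × Int)) (max_values : Int) (others : Bool), Dom_concentrate_values in_dict max_values others → Raises_concentrate_values in_dict max_values others → ¬ Pre_concentrate_values in_dict max_values others) ∧ (Dom_concentrate_values (pvRaiseWitness_concentrate_values.1) (pvRaiseWitness_concentrate_values.2.1) (pvRaiseWitness_concentrate_values.2.2) ∧ Raises_concentrate_values (pvRaiseWitness_concentrate_values.1) (pvRaiseWitness_concentrate_values.2.1) (pvRaiseWitness_concentrate_values.2.2) ∧ concentrate_values_alt (pvRaiseWitness_concentrate_values.1) (pvRaiseWitness_concentrate_values.2.1) (pvRaiseWitness_concentrate_values.2.2) = pvRaiseWitnessOut_concentrate_values)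

-- ===== LEMMAS AND PROOFS =====

-- B's loop body, named for the proofs
def cvStep (k : Int) (st : PySem.Dict String Int × Int × Option (String × Int) × Int)
    (p : Int × (String × Int)) : PySem.Dict String Int × Int × Option (String × Int) × Int :=
  if p.1 < k then (st.1.insert p.2.1 p.2.2, st.2)
  else (st.1, st.2.1 + p.2.2, some p.2, st.2.2.2 + 1)

lemma cv_slice_none_some {α : Type} (xs : List α) (c : Int) :
    PySem.List.slice xs none (some c) = xs.take (PySem.List.clampIdx xs.length c) := by
  simp [PySem.List.slice]

lemma cv_foldl_insert_eq_mk (t : List (String × Int)) (hnd : (t.map Prod.fst).Nodup) :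
    t.foldl (fun o p => o.insert p.1 p.2) (PySem.Dict.empty : PySem.Dict String Int)
      = PySem.Dict.mk t := by
  apply PySem.Dict.ext
  have h := PySem.Dict.items_foldl_insert_fresh t Prod.fst Prod.snd PySem.Dict.empty
    (by intro a _; exact PySem.Dict.contains_empty _) hnd
  simpa using h

lemma cv_foldl_lt (k : Int) (xs : List (String × Int)) (s : Int)
    (h : s + xs.length ≤ k) (o : PySem.Dict String Int)
    (r : Int × Option (String × Int) × Int) :
    (PySem.List.enumerate xs s).foldl (cvStep k) (o, r)
      = (xs.foldl (fun o p => o.insert p.1 p.2) o, r) := by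
  induction xs generalizing s o with
  | nil => simp [PySem.List.enumerate]
  | cons x xs ih =>
    rw [PySem.List.enumerate_cons]
    have hl : (s : Int) + (x :: xs).length = s + 1 + xs.length := by push_cast [List.length_cons]; ring
    rw [hl] at h
    have hx : s < k := by have := Int.natCast_nonneg xs.length; omega
    simp only [List.foldl_cons, cvStep, if_pos hx]
    exact ih (s + 1) h _

lemma cv_foldl_ge (k : Int) (xs : List (String × Int)) (s : Int) (h : k ≤ s)
    (o : PySem.Dict String Int) (ts : Int) (t : Option (String × Int)) (cnt : Int) :
    (PySem.List.enumerate xs s).foldl (cvStep k) (o, ts, t, cnt)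
      = (o, ts + (xs.map Prod.snd).sum, xs.getLast?.or t, cnt + xs.length) := by
  induction xs generalizing s ts t cnt with
  | nil => simp [PySem.List.enumerate]
  | cons x xs ih =>
    rw [PySem.List.enumerate_cons]
    have hx : ¬ s < k := by omega
    simp only [List.foldl_cons, cvStep, if_neg hx]
    rw [ih (s + 1) (by omega)]
    have ht : (x :: xs).getLast?.or t = xs.getLast?.or (some x) := by
      cases xs with
      | nil => simp
      | cons y ys =>
          rw [List.getLast?_cons_cons]
          cases h' : (y :: ys).getLast? with
          | none => simp [List.getLast?_eq_none_iff] at h'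
          | some q => simp
    simp only [List.map_cons, List.sum_cons, List.length_cons, ht]
    refine Prod.ext rfl (Prod.ext ?_ (Prod.ext rfl ?_)) <;> simp <;> ring

theorem cv_main (l : List (String × Int)) (mv : Int) (o : Bool)
    (hnd : (l.map Prod.fst).Nodup)
    (hpre : ¬(o = true ∧ l.length = 1 ∧ mv < 0)) :
    concentrate_values l mv o = concentrate_values_alt l mv o := by
  unfold concentrate_values concentrate_values_alt
  by_cases hle : (l.length : Int) ≤ mv
  · simp [hle]
  · simp only [if_neg hle]
    set c : Int := mv - (if o then 1 else 0) with hc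
    set n : Nat := l.length with hn
    set kN : Nat := PySem.List.clampIdx n c with hkN
    have hcn : c < (n : Int) := by
      rcases Bool.eq_false_or_eq_true o with h | h <;> simp [hc, h] <;> omega
    have hkn : kN ≤ n := by
      rw [hkN]; unfold PySem.List.clampIdx; split_ifs <;> omega
    have hkB : (if c < 0 then (if (n : Int) + c < 0 then 0 else (n : Int) + c) else c) = (kN : Int) := by
      rw [hkN]; unfold PySem.List.clampIdx; split_ifs <;> omega
    simp only [hkB]
    have hndt : ((l.take kN).map Prod.fst).Nodup := by
      rw [List.map_take]; exact hnd.sublist (List.take_sublist _ _)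
    have hlt : (l.take kN).length = kN := by
      rw [List.length_take]; omega
    have hsl1 : PySem.List.slice (l.map Prod.fst) none (some c) = (l.take kN).map Prod.fst := by
      rw [cv_slice_none_some, List.map_take, List.length_map, ← hn, ← hkN]
    have hsl2 : PySem.List.slice (l.map Prod.fst) (some c) = (l.drop kN).map Prod.fst := by
      rw [PySem.List.slice_some_none, List.map_drop, List.length_map, ← hn, ← hkN]
    have hsl3 : PySem.List.slice (l.map Prod.snd) (some c) = (l.drop kN).map Prod.snd := by
      rw [PySem.List.slice_some_none, List.map_drop, List.length_map, ← hn, ← hkN]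
    have hA0 : List.foldl (fun o i => o.insert i ((PySem.Dict.mk l).getD i 0)) PySem.Dict.empty
        ((l.take kN).map Prod.fst) = PySem.Dict.mk (l.take kN) := by
      rw [List.foldl_map]
      rw [PySem.List.foldl_congr_mem _ _ (fun (o : PySem.Dict String Int) p => o.insert p.1 p.2) _ ?_]
      · exact cv_foldl_insert_eq_mk _ hndt
      · intro acc p hp
        have hval : (PySem.Dict.mk l).getD p.1 0 = p.2 :=
          PySem.Dict.getD_of_mem_items _ (by simpa using List.mem_of_mem_take hp)
            (by simpa [PySem.Dict.keys] using hnd) 0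
        rw [hval]
    have hB : List.foldl (cvStep (kN : Int)) (PySem.Dict.empty, 0, none, 0) (PySem.List.enumerate l)
        = (PySem.Dict.mk (l.take kN), ((l.drop kN).map Prod.snd).sum,
           (l.drop kN).getLast?, ((l.drop kN).length : Int)) := by
      conv_lhs => rw [← List.take_append_drop kN l]
      rw [PySem.List.enumerate_append, List.foldl_append]
      rw [cv_foldl_lt (kN : Int) _ 0 (by rw [hlt]; omega) _ _]
      rw [cv_foldl_insert_eq_mk _ hndt]
      rw [cv_foldl_ge (kN : Int) _ _ (by rw [hlt]; omega) _ _ _ _]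
      simp
    rw [hsl1, hsl2, hsl3, hA0]
    rw [show (fun (st : PySem.Dict String Int × Int × Option (String × Int) × Int)
          (p : Int × (String × Int)) =>
          if p.1 < (kN : Int) then (st.1.insert p.2.1 p.2.2, st.2)
          else (st.1, st.2.1 + p.2.2, some p.2, st.2.2.2 + 1)) = cvStep (kN : Int) from rfl]
    rw [hB]
    cases o with
    | false => rfl
    | true =>
      have hpre' : ¬(n = 1 ∧ mv < 0) := fun h => hpre ⟨rfl, h⟩
      have hcval : c = mv - 1 := by rw [hc]; norm_num
      by_cases h1 : (l.drop kN).length = 1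
      · have hkn1 : kN + 1 = n := by
          rw [List.length_drop, ← hn] at h1; omega
        obtain ⟨p, hp⟩ := List.length_eq_one_iff.mp h1
        have hpmem : p ∈ l := List.mem_of_mem_drop (hp ▸ List.mem_singleton_self p)
        have hpget? : l[kN]? = some p := by
          have h0 : (l.drop kN)[0]? = some p := by rw [hp]; rfl
          rw [List.getElem?_drop] at h0; simpa using h0
        have hidx : (l.map Prod.fst)[kN]? = some p.1 := by
          rw [List.getElem?_map, hpget?]; rfl
        have hc01 : 0 ≤ c ∨ c = -1 := by
          by_cases hc0 : 0 ≤ c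
          · exact Or.inl hc0
          · right
            have hkn1' := hkn1
            rw [hkN] at hkn1'
            unfold PySem.List.clampIdx at hkn1'
            rw [if_pos (by omega)] at hkn1'
            split_ifs at hkn1' with h2
            · exfalso
              have hn1 : n = 1 := by omega
              have hmv : ¬ mv < 0 := fun hm => hpre' ⟨hn1, hm⟩
              omega
            · omega
        have hget : PySem.List.pyGet? (l.map Prod.fst) c = some p.1 := by
          rcases hc01 with hc0 | hcneg
          · rw [PySem.List.pyGet?_of_nonneg _ hc0]
            have hct : c.toNat = kN := by
              rw [hkN]; unfold PySem.List.clampIdx; rw [if_neg (by omega)]; omega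
            rw [hct, hidx]
          · rw [hcneg, PySem.List.pyGet?_neg_one, List.getLast?_eq_getElem?]
            rw [List.length_map, ← hn, show n - 1 = kN by omega, hidx]
        have hvalp : (PySem.Dict.mk l).getD p.1 0 = p.2 :=
          PySem.Dict.getD_of_mem_items _ (by simpa using hpmem)
            (by simpa [PySem.Dict.keys] using hnd) 0
        simp only [hp, hget, List.getLast?_singleton, Option.getD_some, hvalp]
        simp
      · have hne : ¬ (((l.drop kN).length : Int) = 1) := by exact_mod_cast h1
        have h1' : ¬(l.length - kN = 1) := by rw [List.length_drop] at h1; exact h1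
        simp [h1']

-- ===== VERDICT (by name: the statement is the Claim_ definition above) =====
theorem concentrate_values_spec : Claim_equal_concentrate_values := by
  intro l mv o _ hpre
  unfold Spec_concentrate_values
  exact cv_main l mv o hpre.1 hpre.2

theorem concentrate_values_raises : Claim_raises_concentrate_values := by
  unfold Claim_raises_concentrate_values
  exact ⟨by rintro l mv o _ ⟨h1, h2, h3⟩ ⟨_, hp⟩; exact hp ⟨h1, h2, h3⟩, by decide⟩

-- self-check: the crash-fix witness value stated above is the one the raises theorem proves
theorem pvRaiseWitness_ok :
    concentrate_values_alt pvRaiseWitness_concentrate_values.1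
      pvRaiseWitness_concentrate_values.2.1 pvRaiseWitness_concentrate_values.2.2
      = pvRaiseWitnessOut_concentrate_values :=
  concentrate_values_raises.2.2.2
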